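-- pv_equiv track=rewrite | github.com/chenhangcuisg-code/Cross-Architecture-Merging-for-Large-Language-Models | train_hot_residual_sft.py | _parse_layer_and_kind_from_name
-- ===== SOURCE A (Python) =====
-- def _parse_layer_and_kind_from_name(name: str):
--     """
--     Parse from Linear name layer_idx, kind
--     """
--     parts = name.split(".")
--
--     layer_idx = None
--     for i, p in enumerate(parts):
--         if p in ("layers", "h", "blocks") and i + 1 < len(parts):
--             try:
--                 li = int(parts[i + 1])
--                 layer_idx = li
--                 break
--             except ValueError:
--                 continue
--
--     if layer_idx is None:
--         return None, None
--
--     comp = parts[-1]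
--     if comp == "q_proj":
--         kind = "Q"
--     elif comp == "k_proj":
--         kind = "K"
--     elif comp == "v_proj":
--         kind = "V"
--     elif comp in ("o_proj", "out_proj"):
--         kind = "O"
--     else:
--         kind = None
--
--     return layer_idx, kind
-- ===== SOURCE B (Python) =====
-- _MARKERS = {"layers", "h", "blocks"}
-- _KIND = {"q_proj": "Q", "k_proj": "K", "v_proj": "V", "o_proj": "O", "out_proj": "O"}
--
-- def _parse_layer_and_kind_from_name(name: str):
--     # single pass over the raw characters: no split(), no parts list
--     layer = None
--     prev = None          # previous completed segment
--     cur = []             # characters of the segment being read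
--     for ch in name:
--         if ch == ".":
--             seg = "".join(cur)
--             if layer is None and prev in _MARKERS:
--                 try:
--                     layer = int(seg)
--                 except ValueError:
--                     pass
--             prev, cur = seg, []
--         else:
--             cur.append(ch)
--     seg = "".join(cur)   # the last segment (what parts[-1] would be)
--     if layer is None and prev in _MARKERS:
--         try:
--             layer = int(seg)
--         except ValueError:
--             pass
--     if layer is None:
--         return None, None
--     return layer, _KIND.get(seg)
-- ===== Notes on version B (the rewrite author's own statement) =====
-- stated objective: alternative
-- what changed: Replaces split('.')-then-scan-the-parts-list by a single character-level state machine over the raw string that carries the previous/current segment and the layer accumulator, never materialising a parts list.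
import Mathlib
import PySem

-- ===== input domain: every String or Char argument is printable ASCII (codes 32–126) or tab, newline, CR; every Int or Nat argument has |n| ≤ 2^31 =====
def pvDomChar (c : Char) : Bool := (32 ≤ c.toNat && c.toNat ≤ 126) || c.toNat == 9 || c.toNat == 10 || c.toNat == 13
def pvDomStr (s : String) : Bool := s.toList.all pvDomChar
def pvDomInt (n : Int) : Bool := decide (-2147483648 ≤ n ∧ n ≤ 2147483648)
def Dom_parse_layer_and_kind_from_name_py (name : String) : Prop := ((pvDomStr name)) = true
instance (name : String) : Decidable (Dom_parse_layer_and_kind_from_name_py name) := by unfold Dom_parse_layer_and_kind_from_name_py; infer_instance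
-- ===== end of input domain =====

-- B replaces A's split('.')-then-scan-the-parts-list by a single character-level state
-- machine over the raw string (objective: alternative, same cost).

-- ===== PORT A =====
-- the for-loop over enumerate(parts) with `break` on success, `continue` on ValueError
def pvALoop (parts : List String) : List (Int × String) → Option Int
  | [] => none
  | (i, p) :: rest =>
    if (p == "layers" || p == "h" || p == "blocks") && decide (i + 1 < (parts.length : Int)) then
      match PySem.Int.ofStr? (PySem.List.pyGetD parts (i + 1) "") with
      | some li => some li
      | none => pvALoop parts rest
    else pvALoop parts rest

-- the if/elif chain on comp = parts[-1]
def pvAKind (comp : String) : Option String :=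
  if comp == "q_proj" then some "Q"
  else if comp == "k_proj" then some "K"
  else if comp == "v_proj" then some "V"
  else if comp == "o_proj" || comp == "out_proj" then some "O"
  else none

def parse_layer_and_kind_from_name_py (name : String) : Option Int × Option String :=
  let parts := (PySem.Str.split? name ".").getD []
  match pvALoop parts (PySem.List.enumerate parts 0) with
  | none => (none, none)
  | some layer_idx => (some layer_idx, pvAKind (PySem.List.pyGetD parts (-1) ""))

-- ===== PORT B =====
def pvKindMap : PySem.Dict String String :=
  PySem.Dict.ofList [("q_proj", "Q"), ("k_proj", "K"), ("v_proj", "V"), ("o_proj", "O"), ("out_proj", "O")]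

-- `prev in _MARKERS` (prev is None before the first dot)
def pvIsMarker : Option String → Bool
  | some s => s == "layers" || s == "h" || s == "blocks"
  | none => false

-- `if layer is None and prev in _MARKERS: try: layer = int(seg) except ValueError: pass`
def pvTryUpdate (layer : Option Int) (prev : Option String) (seg : String) : Option Int :=
  match layer with
  | some v => some v
  | none => if pvIsMarker prev then PySem.Int.ofStr? seg else none

-- the character loop of B: state = (layer, prev segment, current segment chars)
def pvMachine (layer : Option Int) (prev : Option String) (cur : List Char) :
    List Char → Option Int × Option String
  | [] =>
    let seg := String.ofList cur
    match pvTryUpdate layer prev seg with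
    | none => (none, none)
    | some v => (some v, PySem.Dict.get? pvKindMap seg)
  | c :: rest =>
    if c = '.' then
      let seg := String.ofList cur
      pvMachine (pvTryUpdate layer prev seg) (some seg) [] rest
    else
      pvMachine layer prev (cur ++ [c]) rest

def parse_layer_and_kind_from_name_py_alt (name : String) : Option Int × Option String :=
  pvMachine none none [] name.toList

-- ===== PRECONDITION & SPEC =====
def Spec_parse_layer_and_kind_from_name_py (name : String) (out : Option Int × Option String) : Prop := out = parse_layer_and_kind_from_name_py_alt name
instance (name : String) (out : Option Int × Option String) : Decidable (Spec_parse_layer_and_kind_from_name_py name out) := by unfold Spec_parse_layer_and_kind_from_name_py; infer_instance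

-- ===== CLAIM (what is proved, stated in full; the proofs are below) =====
def Claim_equal_parse_layer_and_kind_from_name_py : Prop := ∀ (name : String), Dom_parse_layer_and_kind_from_name_py name → Spec_parse_layer_and_kind_from_name_py name (parse_layer_and_kind_from_name_py name)

-- ===== LEMMAS AND PROOFS =====

-- a simple right-recursive characterisation of split('.')
def pvDsplit : List Char → List (List Char)
  | [] => [[]]
  | c :: r => if c = '.' then [] :: pvDsplit r else (pvDsplit r).modifyHead (c :: ·)

theorem pvDsplit_ne_nil (cs : List Char) : pvDsplit cs ≠ [] := by
  induction cs with
  | nil => simp [pvDsplit]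
  | cons c r ih =>
    simp only [pvDsplit]
    split_ifs
    · simp
    · cases h : pvDsplit r with
      | nil => exact absurd h ih
      | cons a t => simp [List.modifyHead]

theorem pvGo_eq (l : List Char) : ∀ (fuel : Nat) (cur : List Char) (acc : List (List Char)),
    l.length < fuel →
    PySem.Chars.splitOn.go ['.'] fuel l cur acc =
      acc.reverse ++ (pvDsplit l).modifyHead (cur.reverse ++ ·) := by
  induction l with
  | nil =>
    intro fuel cur acc h
    cases fuel with
    | zero => omega
    | succ f => simp [PySem.Chars.splitOn.go, pvDsplit]
  | cons c rest ih =>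
    intro fuel cur acc h
    cases fuel with
    | zero => omega
    | succ f =>
      rw [PySem.Chars.splitOn.go]
      by_cases hc : c = '.'
      · subst hc
        have hpre : ['.'].isPrefixOf ('.' :: rest) = true := by
          simp [List.isPrefixOf]
        rw [if_pos hpre]
        have := ih f [] (cur.reverse :: acc) (by simp at h ⊢; omega)
        simp only [List.length_cons, List.length_nil, List.drop_zero, List.length_singleton,
          List.drop_succ_cons] at this ⊢
        rw [this]
        cases hd : pvDsplit rest with
        | nil => exact absurd hd (pvDsplit_ne_nil rest)
        | cons a t => simp [pvDsplit, List.modifyHead, hd]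
      · have hpre : ['.'].isPrefixOf (c :: rest) = false := by
          simp [List.isPrefixOf, hc]
          intro hh; exact absurd hh.symm hc
        rw [if_neg (by simp [hpre])]
        have := ih f (c :: cur) acc (by simp at h ⊢; omega)
        rw [this]
        simp only [pvDsplit, if_neg hc]
        congr 1
        cases hd : pvDsplit rest with
        | nil => exact absurd hd (pvDsplit_ne_nil rest)
        | cons a t => simp [List.modifyHead]

theorem pvSplitOn_eq (cs : List Char) :
    PySem.Chars.splitOn cs ['.'] = pvDsplit cs := by
  have h := pvGo_eq cs (cs.length + 1) [] [] (by omega)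
  rw [PySem.Chars.splitOn, h]
  cases hd : pvDsplit cs <;> simp [List.modifyHead]

-- the dict lookup equals A's if/elif chain
theorem pvKind_eq (s : String) : PySem.Dict.get? pvKindMap s = pvAKind s := by
  have hm : pvKindMap = PySem.Dict.mk [("q_proj", "Q"), ("k_proj", "K"), ("v_proj", "V"), ("o_proj", "O"), ("out_proj", "O")] := by decide
  rw [hm]
  simp only [PySem.Dict.get?_mk_cons, pvAKind]
  split_ifs <;> simp_all [BEq.comm (α := String), PySem.Dict.get?]

-- pvRun: the machine viewed on the list of completed segments
def pvRun (layer : Option Int) (prev : Option String) :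
    List String → Option Int × Option String
  | [] => (none, none)   -- never reached: the segment list is always nonempty
  | [seg] =>
    match pvTryUpdate layer prev seg with
    | none => (none, none)
    | some v => (some v, PySem.Dict.get? pvKindMap seg)
  | seg :: rest => pvRun (pvTryUpdate layer prev seg) (some seg) rest

theorem pvMachine_eq_run (cs : List Char) :
    ∀ (layer : Option Int) (prev : Option String) (cur : List Char),
    pvMachine layer prev cur cs =
      pvRun layer prev (((pvDsplit cs).modifyHead (cur ++ ·)).map String.ofList) := by
  induction cs with
  | nil => intro layer prev cur; simp [pvMachine, pvDsplit, pvRun]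
  | cons c rest ih =>
    intro layer prev cur
    by_cases hc : c = '.'
    · subst hc
      rw [show pvMachine layer prev cur ('.' :: rest) =
            pvMachine (pvTryUpdate layer prev (String.ofList cur)) (some (String.ofList cur)) [] rest from by
          simp [pvMachine]]
      rw [ih]
      cases hd : pvDsplit rest with
      | nil => exact absurd hd (pvDsplit_ne_nil rest)
      | cons a t =>
        rw [show pvDsplit ('.' :: rest) = [] :: pvDsplit rest from by simp [pvDsplit], hd]
        simp only [List.modifyHead, List.map_cons, List.nil_append, List.append_nil]
        rfl
    · simp only [pvMachine, if_neg hc, pvDsplit, if_neg hc]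
      rw [ih]
      congr 2
      cases hd : pvDsplit rest with
      | nil => exact absurd hd (pvDsplit_ne_nil rest)
      | cons a t => simp [List.modifyHead]

theorem pvGetD_last (l : List String) (h : l ≠ []) :
    PySem.List.pyGetD l (-1) "" = l.getLast h := by
  have hlen : 0 < l.length := List.length_pos_of_ne_nil h
  simp only [PySem.List.pyGetD, PySem.List.pyGet?, PySem.List.pyIdx?]
  have h1 : ¬ ((-1 : Int) ≥ 0) := by omega
  rw [if_neg h1]
  have h2 : -(l.length : Int) ≤ -1 := by omega
  rw [if_pos h2]
  have h3 : (-(-1 : Int)).toNat = 1 := by decide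
  rw [h3]
  simp only [Option.bind_some]
  rw [List.getElem?_eq_getElem (by omega)]
  simp [List.getLast_eq_getElem]

-- carried layer: once some, pvRun returns it with the kind of the LAST segment
theorem pvRun_some (segs : List String) : ∀ (prev : Option String) (v : Int) (h : segs ≠ []),
    pvRun (some v) prev segs = (some v, PySem.Dict.get? pvKindMap (segs.getLast h)) := by
  induction segs with
  | nil => intro _ _ h; exact absurd rfl h
  | cons s rest ih =>
    intro prev v _
    cases rest with
    | nil => simp [pvRun, pvTryUpdate]
    | cons b t =>
      rw [show pvRun (some v) prev (s :: b :: t) = pvRun (pvTryUpdate (some v) prev s) (some s) (b :: t) from rfl]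
      rw [show pvTryUpdate (some v) prev s = some v from rfl]
      rw [ih (some s) v (by simp)]
      simp [List.getLast]

-- the machine's run over segments equals A's indexed loop over the same parts
theorem pvRun_eq_aloop (rs : List String) : ∀ (pre : List String) (p : String), rs ≠ [] →
    pvRun none (some p) rs =
      (match pvALoop (pre ++ p :: rs) (PySem.List.enumerate (p :: rs) (pre.length : Int)) with
        | none => ((none : Option Int), (none : Option String))
        | some v => (some v, pvAKind (PySem.List.pyGetD (pre ++ p :: rs) (-1) ""))) := by
  induction rs with
  | nil => intro _ _ h; exact absurd rfl h
  | cons q rs' ih =>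
    intro pre p _
    have hget : PySem.List.pyGetD (pre ++ p :: q :: rs') ((pre.length : Int) + 1) "" = q := by
      have h1 : ((pre.length : Int) + 1) = ((pre.length + 1 : Nat) : Int) := by push_cast; ring
      rw [h1, PySem.List.pyGetD_natCast]
      induction pre with
      | nil => rfl
      | cons a pre ihp => simpa using ihp
    have hlen : ((pre.length : Int) + 1 < ((pre ++ p :: q :: rs').length : Int)) := by
      simp only [List.length_append, List.length_cons]; push_cast; omega
    have hlast : PySem.List.pyGetD (pre ++ p :: q :: rs') (-1) "" =
        (pre ++ p :: q :: rs').getLast (by simp) := pvGetD_last _ (by simp)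
    rw [PySem.List.enumerate_cons]
    by_cases hp : (p == "layers" || p == "h" || p == "blocks") = true
    · -- prev is a marker: A tries int(q) at this pair, so does the machine
      have hmk : pvIsMarker (some p) = true := by simpa [pvIsMarker] using hp
      rw [show pvALoop (pre ++ p :: q :: rs') (((pre.length : Int), p) :: PySem.List.enumerate (q :: rs') ((pre.length : Int) + 1)) =
            (if (p == "layers" || p == "h" || p == "blocks") && decide ((pre.length : Int) + 1 < ((pre ++ p :: q :: rs').length : Int)) then
              match PySem.Int.ofStr? (PySem.List.pyGetD (pre ++ p :: q :: rs') ((pre.length : Int) + 1) "") with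
              | some li => some li
              | none => pvALoop (pre ++ p :: q :: rs') (PySem.List.enumerate (q :: rs') ((pre.length : Int) + 1))
              else pvALoop (pre ++ p :: q :: rs') (PySem.List.enumerate (q :: rs') ((pre.length : Int) + 1))) from rfl]
      rw [if_pos (by simp [hp, hlen]), hget]
      cases hq : PySem.Int.ofStr? q with
      | some v =>
        -- success: both sides break with v and the kind of the last part
        cases rs' with
        | nil =>
          simp only [pvRun, pvTryUpdate, hmk, if_pos, hq]
          rw [hlast, pvKind_eq]
          simp [List.getLast]
        | cons b t =>
          rw [show pvRun none (some p) (q :: b :: t) = pvRun (pvTryUpdate none (some p) q) (some q) (b :: t) from rfl]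
          rw [show pvTryUpdate none (some p) q = PySem.Int.ofStr? q from by simp [pvTryUpdate, hmk], hq]
          rw [pvRun_some (b :: t) (some q) v (by simp)]
          rw [hlast, pvKind_eq]
          congr 1
          simp [List.getLast]
      | none =>
        -- ValueError: both sides continue with q as the new prev
        cases rs' with
        | nil =>
          simp only [pvRun, pvTryUpdate, hmk, if_pos, hq]
          rw [PySem.List.enumerate_cons, PySem.List.enumerate_nil]
          rw [show pvALoop (pre ++ [p, q]) [(((pre.length : Int) + 1), q)] =
                (if (q == "layers" || q == "h" || q == "blocks") && decide ((pre.length : Int) + 1 + 1 < (((pre ++ [p, q]) : List String).length : Int)) then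
                  match PySem.Int.ofStr? (PySem.List.pyGetD (pre ++ [p, q]) ((pre.length : Int) + 1 + 1) "") with
                  | some li => some li
                  | none => pvALoop (pre ++ [p, q]) []
                  else pvALoop (pre ++ [p, q]) []) from rfl]
          have hb : ¬ ((pre.length : Int) + 1 + 1 < (((pre ++ [p, q]) : List String).length : Int)) := by
            simp only [List.length_append, List.length_cons, List.length_nil]; push_cast; omega
          rw [if_neg (by simp; omega)]
          rfl
        | cons b t =>
          rw [show pvRun none (some p) (q :: b :: t) = pvRun (pvTryUpdate none (some p) q) (some q) (b :: t) from rfl]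
          rw [show pvTryUpdate none (some p) q = PySem.Int.ofStr? q from by simp [pvTryUpdate, hmk], hq]
          have := ih (pre ++ [p]) q (by simp)
          rw [this]
          simp only [List.append_assoc, List.cons_append, List.nil_append, List.length_append,
            List.length_cons, List.length_nil]
          norm_num
    · -- prev is not a marker: A skips this pair, so does the machine
      have hmk : pvIsMarker (some p) = false := by simpa [pvIsMarker] using hp
      rw [show pvALoop (pre ++ p :: q :: rs') (((pre.length : Int), p) :: PySem.List.enumerate (q :: rs') ((pre.length : Int) + 1)) =
            (if (p == "layers" || p == "h" || p == "blocks") && decide ((pre.length : Int) + 1 < ((pre ++ p :: q :: rs').length : Int)) then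
              match PySem.Int.ofStr? (PySem.List.pyGetD (pre ++ p :: q :: rs') ((pre.length : Int) + 1) "") with
              | some li => some li
              | none => pvALoop (pre ++ p :: q :: rs') (PySem.List.enumerate (q :: rs') ((pre.length : Int) + 1))
              else pvALoop (pre ++ p :: q :: rs') (PySem.List.enumerate (q :: rs') ((pre.length : Int) + 1))) from rfl]
      rw [if_neg (by simp [hp])]
      cases rs' with
      | nil =>
        simp only [pvRun, pvTryUpdate, hmk, Bool.false_eq_true, if_false]
        rw [PySem.List.enumerate_cons, PySem.List.enumerate_nil]
        rw [show pvALoop (pre ++ [p, q]) [(((pre.length : Int) + 1), q)] =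
              (if (q == "layers" || q == "h" || q == "blocks") && decide ((pre.length : Int) + 1 + 1 < (((pre ++ [p, q]) : List String).length : Int)) then
                match PySem.Int.ofStr? (PySem.List.pyGetD (pre ++ [p, q]) ((pre.length : Int) + 1 + 1) "") with
                | some li => some li
                | none => pvALoop (pre ++ [p, q]) []
                else pvALoop (pre ++ [p, q]) []) from rfl]
        have hb : ¬ ((pre.length : Int) + 1 + 1 < (((pre ++ [p, q]) : List String).length : Int)) := by
          simp only [List.length_append, List.length_cons, List.length_nil]; push_cast; omega
        rw [if_neg (by simp; omega)]
        rfl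
      | cons b t =>
        rw [show pvRun none (some p) (q :: b :: t) = pvRun (pvTryUpdate none (some p) q) (some q) (b :: t) from rfl]
        rw [show pvTryUpdate none (some p) q = none from by simp [pvTryUpdate, hmk]]
        have := ih (pre ++ [p]) q (by simp)
        rw [this]
        simp only [List.append_assoc, List.cons_append, List.nil_append, List.length_append,
          List.length_cons, List.length_nil]
        norm_num

-- ===== VERDICT (by name: the statement is the Claim_ definition above) =====
theorem parse_layer_and_kind_from_name_py_spec : Claim_equal_parse_layer_and_kind_from_name_py := by
  intro name _
  unfold Spec_parse_layer_and_kind_from_name_py parse_layer_and_kind_from_name_py parse_layer_and_kind_from_name_py_alt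
  have hts : ("." : String).toList = ['.'] := rfl
  have hsplit : (PySem.Str.split? name ".").getD [] = (pvDsplit name.toList).map String.ofList := by
    simp only [PySem.Str.split?, hts, PySem.Chars.split?, List.isEmpty_cons, Option.map_some,
      Option.getD_some, if_false, Bool.false_eq_true, pvSplitOn_eq]
  rw [pvMachine_eq_run name.toList none none [], hsplit]
  have hmod : ((pvDsplit name.toList).modifyHead (([] : List Char) ++ ·)) = pvDsplit name.toList := by
    cases hd : pvDsplit name.toList with
    | nil => rfl
    | cons a t => simp [List.modifyHead]
  rw [hmod]
  cases hd : pvDsplit name.toList with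
  | nil => exact absurd hd (pvDsplit_ne_nil _)
  | cons s t =>
    cases t with
    | nil =>
      -- single segment: no pair to try on either side
      simp only [List.map_cons, List.map_nil]
      rw [PySem.List.enumerate_cons, PySem.List.enumerate_nil]
      rw [show pvALoop [String.ofList s] [((0 : Int), String.ofList s)] =
            (if (String.ofList s == "layers" || String.ofList s == "h" || String.ofList s == "blocks") && decide ((0 : Int) + 1 < (([String.ofList s] : List String).length : Int)) then
              match PySem.Int.ofStr? (PySem.List.pyGetD [String.ofList s] ((0 : Int) + 1) "") with
              | some li => some li
              | none => pvALoop [String.ofList s] []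
              else pvALoop [String.ofList s] []) from rfl]
      rw [if_neg (by simp)]
      simp [pvRun, pvTryUpdate, pvIsMarker, pvALoop]
    | cons b t' =>
      simp only [List.map_cons]
      rw [show pvRun none none (String.ofList s :: String.ofList b :: t'.map String.ofList) =
            pvRun (pvTryUpdate none none (String.ofList s)) (some (String.ofList s)) (String.ofList b :: t'.map String.ofList) from rfl]
      rw [show pvTryUpdate none none (String.ofList s) = none from rfl]
      have := pvRun_eq_aloop (String.ofList b :: t'.map String.ofList) [] (String.ofList s) (by simp)
      rw [this]
      simp
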